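-- pv_equiv track=rewrite | github.com/phatjmo/StoryRAG | global_entity_indexer.py | collect_global_entities
-- ===== SOURCE A (Python) =====
-- from collections import defaultdict
--
-- ENTITY_TYPE_MAP = {
--     "PERSON": "Character",
--     "GPE": "Place",
--     "LOC": "Place",
--     "ORG": "Organization",
--     "PRODUCT": "Item",
--     "WORK_OF_ART": "Item",
--     "DATE": "Date",
--     "TIME": "Time",
--     "MONEY": "Monetary Value",
--     "NORP": "Group or Culture",
--     "EVENT": "Event",
--     "LAW": "Theme",
--     "LANGUAGE": "Theme"
-- }
--
-- def collect_global_entities(chapters):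
--     grouped = defaultdict(set)
--     for ch in chapters:
--         for ent_type, values in ch.get("entities", {}).items():
--             unified_type = ENTITY_TYPE_MAP.get(ent_type, ent_type.title())
--             for val in values:
--                 grouped[unified_type].add(val.strip())
--     return {k: sorted(v) for k, v in grouped.items()}
-- ===== SOURCE B (Python) =====
-- ENTITY_TYPE_MAP = {
--     "PERSON": "Character",
--     "GPE": "Place",
--     "LOC": "Place",
--     "ORG": "Organization",
--     "PRODUCT": "Item",
--     "WORK_OF_ART": "Item",
--     "DATE": "Date",
--     "TIME": "Time",
--     "MONEY": "Monetary Value",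
--     "NORP": "Group or Culture",
--     "EVENT": "Event",
--     "LAW": "Theme",
--     "LANGUAGE": "Theme"
-- }
--
-- def collect_global_entities(chapters):
--     pairs = [(ENTITY_TYPE_MAP.get(t, t.title()), v.strip())
--              for ch in chapters
--              for t, vals in ch.get("entities", {}).items()
--              for v in vals]
--     keys = list(dict.fromkeys(k for k, _ in pairs))
--     return {k: sorted({v for kk, v in pairs if kk == k}) for k in keys}
-- ===== Notes on version B (the rewrite author's own statement) =====
-- stated objective: alternative
-- what changed: Replaces the defaultdict-of-sets grouping with a flat (unified_type, stripped_value) pair list, an ordered key dedup, and a per-key set-comprehension + sort.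
import Mathlib
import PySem

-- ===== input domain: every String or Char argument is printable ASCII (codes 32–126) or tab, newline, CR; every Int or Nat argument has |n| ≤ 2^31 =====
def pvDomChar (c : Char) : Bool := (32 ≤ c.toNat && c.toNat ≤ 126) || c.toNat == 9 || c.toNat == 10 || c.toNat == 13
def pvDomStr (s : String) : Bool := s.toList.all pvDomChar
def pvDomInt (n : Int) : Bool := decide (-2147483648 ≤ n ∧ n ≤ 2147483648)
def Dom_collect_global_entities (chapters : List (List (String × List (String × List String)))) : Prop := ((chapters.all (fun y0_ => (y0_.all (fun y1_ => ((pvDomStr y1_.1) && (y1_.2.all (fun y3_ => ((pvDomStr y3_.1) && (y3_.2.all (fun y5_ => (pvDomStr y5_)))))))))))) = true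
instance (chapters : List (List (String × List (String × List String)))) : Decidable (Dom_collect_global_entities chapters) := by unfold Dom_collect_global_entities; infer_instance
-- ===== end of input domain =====

-- B replaces A's defaultdict-of-sets grouping by a flat pair list, an ordered key dedup
-- and a per-key set comprehension + sort (alternative decomposition, same results).

-- ===== PORT A =====
-- shared module constant ENTITY_TYPE_MAP
def ENTITY_TYPE_MAP : List (String × String) :=
  [("PERSON", "Character"), ("GPE", "Place"), ("LOC", "Place"), ("ORG", "Organization"),
   ("PRODUCT", "Item"), ("WORK_OF_ART", "Item"), ("DATE", "Date"), ("TIME", "Time"),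
   ("MONEY", "Monetary Value"), ("NORP", "Group or Culture"), ("EVENT", "Event"),
   ("LAW", "Theme"), ("LANGUAGE", "Theme")]

-- hand port of str.title(): a letter is uppercased iff the previous character is not cased;
-- exact on the ASCII domain, where Python's "cased" characters are exactly the letters.
def pyTitleGo : Bool → List Char → List Char
  | _, [] => []
  | prev, c :: cs =>
      (if PySem.Chars.isalpha c then
        (if prev then PySem.Chars.lowerChar c else PySem.Chars.upperChar c)
       else c) :: pyTitleGo (PySem.Chars.isalpha c) cs

def pyTitle (s : String) : String := String.ofList (pyTitleGo false s.toList)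

-- ENTITY_TYPE_MAP.get(ent_type, ent_type.title()) — shared by both Python versions
def unifyType (t : String) : String := (PySem.Dict.mk ENTITY_TYPE_MAP).getD t (pyTitle t)

def collect_global_entities (chapters : List (List (String × List (String × List String)))) : List (String × List String) :=
  -- grouped = defaultdict(set); grouped[unified_type].add(val.strip()) — a defaultdict
  -- access-and-mutate is Dict.modify with default ∅; then {k: sorted(v) for k, v in grouped.items()}
  (chapters.foldl (fun g ch =>
      ((PySem.Dict.mk ch).getD "entities" []).foldl (fun g tv =>
        tv.2.foldl (fun g v =>
          g.modify (unifyType tv.1) [] (fun s => PySem.Set.add s (PySem.Str.strip v))) g) g)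
      PySem.Dict.empty).items.map (fun kv => (kv.1, PySem.List.sorted kv.2 (fun x => x) false))

-- ===== PORT B =====
-- the key dedup + dict comprehension of Source B, over the flat pair list
def pvB (pairs : List (String × String)) : List (String × List String) :=
  ((PySem.List.dedup (pairs.map (·.1))).foldl (fun d k =>
      d.insert k (PySem.List.sorted
        (PySem.Set.ofList ((pairs.filter (fun q => q.1 == k)).map (·.2))) (fun x => x) false))
    PySem.Dict.empty).items

def collect_global_entities_alt (chapters : List (List (String × List (String × List String)))) : List (String × List String) :=
  -- pairs = the flat comprehension; keys = list(dict.fromkeys(k for k, _ in pairs));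
  -- result = {k: sorted({v for kk, v in pairs if kk == k}) for k in keys}
  pvB (chapters.flatMap (fun ch =>
      ((PySem.Dict.mk ch).getD "entities" []).flatMap (fun tv =>
        tv.2.map (fun v => (unifyType tv.1, PySem.Str.strip v)))))

-- ===== PRECONDITION & SPEC =====
def Spec_collect_global_entities (chapters : List (List (String × List (String × List String)))) (out : List (String × List String)) : Prop := out = collect_global_entities_alt chapters
instance (chapters : List (List (String × List (String × List String)))) (out : List (String × List String)) : Decidable (Spec_collect_global_entities chapters out) := by unfold Spec_collect_global_entities; infer_instance

-- ===== CLAIM (what is proved, stated in full; the proofs are below) =====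
def Claim_equal_collect_global_entities : Prop := ∀ (chapters : List (List (String × List (String × List String)))), Dom_collect_global_entities chapters → Spec_collect_global_entities chapters (collect_global_entities chapters)

-- ===== LEMMAS AND PROOFS =====

-- the flat pair list both sides range over
def pvPairs (chapters : List (List (String × List (String × List String)))) : List (String × String) :=
  chapters.flatMap (fun ch =>
    ((PySem.Dict.mk ch).getD "entities" []).flatMap (fun tv =>
      tv.2.map (fun v => (unifyType tv.1, PySem.Str.strip v))))

-- A's loop step on one flat pair
def pvStepA (g : PySem.Dict String (PySem.Set String)) (p : String × String) : PySem.Dict String (PySem.Set String) :=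
  g.modify p.1 [] (fun s => PySem.Set.add s p.2)

-- a fold over a flatMap is the nested fold
theorem pv_foldl_flatMap {α β γ : Type} (l : List α) (f : α → List β) (g : γ → β → γ) (init : γ) :
    (l.flatMap f).foldl g init = l.foldl (fun acc x => (f x).foldl g acc) init := by
  induction l generalizing init with
  | nil => rfl
  | cons x xs ih => simp [List.flatMap_cons, List.foldl_append, ih]

-- A's triple-nested loop is the flat fold over pvPairs
theorem pv_A_nested_eq_flat (chapters : List (List (String × List (String × List String)))) :
    chapters.foldl (fun g ch =>
      ((PySem.Dict.mk ch).getD "entities" []).foldl (fun g tv =>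
        tv.2.foldl (fun g v =>
          g.modify (unifyType tv.1) [] (fun s => PySem.Set.add s (PySem.Str.strip v))) g) g)
      PySem.Dict.empty
    = (pvPairs chapters).foldl pvStepA PySem.Dict.empty := by
  unfold pvPairs
  rw [pv_foldl_flatMap]
  congr 1
  funext g ch
  rw [pv_foldl_flatMap]
  congr 1
  funext g' tv
  rw [List.foldl_map]
  rfl

-- value accumulated at key c after folding pvStepA
theorem pv_getD_fold (ps : List (String × String)) (d : PySem.Dict String (PySem.Set String)) (c : String) :
    (ps.foldl pvStepA d).getD c [] =
      ((ps.filter (fun q => q.1 == c)).map (·.2)).foldl PySem.Set.add (d.getD c []) := by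
  induction ps generalizing d with
  | nil => rfl
  | cons p ps ih =>
      simp only [List.foldl_cons, ih, List.filter_cons]
      by_cases h : p.1 = c
      · simp [pvStepA, h]
      · have hb : (p.1 == c) = false := by simp [h]
        simp [hb, pvStepA, PySem.Dict.getD_modify, show ¬ c = p.1 from fun hc => h hc.symm]

theorem pv_final (ps : List (String × String)) :
    ((ps.foldl pvStepA PySem.Dict.empty).items).map
      (fun kv => (kv.1, PySem.List.sorted kv.2 (fun x => x) false)) = pvB ps := by
  have hkeys : ((ps.foldl pvStepA PySem.Dict.empty).keys) = PySem.List.dedup (ps.map (·.1)) := by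
    have := PySem.Dict.keys_foldl_modify_key (l := ps) (key := (·.1)) (d0 := ([] : PySem.Set String))
      (f := fun _ p => (fun s => PySem.Set.add s p.2)) (d := PySem.Dict.empty)
    simp [PySem.Dict.keys_empty, PySem.Set.update_nil_left] at this
    exact this
  have hnd : ((ps.foldl pvStepA PySem.Dict.empty).keys).Nodup := by
    rw [hkeys]; exact PySem.List.nodup_dedup _
  have hitems : (ps.foldl pvStepA PySem.Dict.empty).items
      = (PySem.List.dedup (ps.map (·.1))).map
          (fun k => (k, PySem.Set.ofList ((ps.filter (fun q => q.1 == k)).map (·.2)))) := by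
    rw [PySem.Dict.items_eq_map_keys _ hnd ([] : PySem.Set String), hkeys]
    apply List.map_congr_left
    intro k _
    rw [pv_getD_fold]
    simp [PySem.Set.ofList_eq_foldl]
  have hB : pvB ps
      = (PySem.List.dedup (ps.map (·.1))).map (fun k => (k, PySem.List.sorted
          (PySem.Set.ofList ((ps.filter (fun q => q.1 == k)).map (·.2))) (fun x => x) false)) := by
    unfold pvB
    have := PySem.Dict.items_foldl_insert_fresh (l := PySem.List.dedup (ps.map (·.1)))
      (k := fun k => k)
      (v := fun k => PySem.List.sorted
        (PySem.Set.ofList ((ps.filter (fun q => q.1 == k)).map (·.2))) (fun x => x) false)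
      (d := PySem.Dict.empty)
      (by intro a _; exact PySem.Dict.contains_empty a)
      (by simpa using PySem.List.nodup_dedup (ps.map (·.1)))
    simpa using this
  rw [hitems, hB, List.map_map]
  rfl

-- ===== VERDICT (by name: the statement is the Claim_ definition above) =====
theorem collect_global_entities_spec : Claim_equal_collect_global_entities := by
  intro chapters _
  unfold Spec_collect_global_entities collect_global_entities collect_global_entities_alt
  rw [pv_A_nested_eq_flat]
  exact pv_final (pvPairs chapters)
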